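-- pv_equiv track=rewrite | github.com/oxyoxy1/ParlayWizard | helpers.py | parse_statistics
-- ===== SOURCE A (Python) =====
-- def parse_statistics(stats):
--     """Parse statistics to extract trends and create a table for display."""
--     trends = {"points": [], "assists": [], "rebounds": [], "blocks": [], "steals": []}
--     table = []
--
--     for game in stats:
--         points = game.get("PTS", 0)
--         assists = game.get("AST", 0)
--         rebounds = game.get("REB", 0)
--         blocks = game.get("BLK", 0)
--         steals = game.get("STL", 0)
--
--         # We will just use a placeholder for GAME_ID if missing, or exclude it completely if not needed
--         game_id = game.get("GAME_ID", "N/A")  # If GAME_ID is important later, you can handle it in another way.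
--
--         trends["points"].append(points)
--         trends["assists"].append(assists)
--         trends["rebounds"].append(rebounds)
--         trends["blocks"].append(blocks)
--         trends["steals"].append(steals)
--
--         # Append stats to table (excluding GAME_ID for now)
--         table.append([points, assists, rebounds, blocks, steals])
--
--     return trends, table
-- ===== SOURCE B (Python) =====
-- def parse_statistics(stats):
--     """Parse statistics to extract trends and create a table for display."""
--     keys = ["PTS", "AST", "REB", "BLK", "STL"]
--     table = [[game.get(k, 0) for k in keys] for game in stats]
--     names = ["points", "assists", "rebounds", "blocks", "steals"]
--     if table:
--         cols = [list(c) for c in zip(*table)]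
--     else:
--         cols = [[] for _ in names]
--     trends = dict(zip(names, cols))
--     return trends, table
-- ===== Notes on version B (the rewrite author's own statement) =====
-- stated objective: simpler
-- what changed: B builds only the table in one comprehension and derives the five trend lists afterwards by transposing the table (zip(*table)), instead of appending to five dict-held lists inside the loop.
import Mathlib
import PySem

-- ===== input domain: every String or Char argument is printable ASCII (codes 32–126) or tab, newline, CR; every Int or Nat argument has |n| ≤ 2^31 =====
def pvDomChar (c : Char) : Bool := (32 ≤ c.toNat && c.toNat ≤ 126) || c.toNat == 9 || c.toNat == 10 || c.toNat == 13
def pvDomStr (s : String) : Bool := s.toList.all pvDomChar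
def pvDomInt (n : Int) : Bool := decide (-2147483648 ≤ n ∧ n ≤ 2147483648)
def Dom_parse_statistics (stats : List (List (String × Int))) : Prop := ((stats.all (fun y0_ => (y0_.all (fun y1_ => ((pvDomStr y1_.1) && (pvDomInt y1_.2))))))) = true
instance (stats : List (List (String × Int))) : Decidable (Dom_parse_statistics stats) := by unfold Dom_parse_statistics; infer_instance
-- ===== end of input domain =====

-- B builds only the table, one row per game, and obtains the five trend lists afterwards by
-- transposing the table; A appends to five dict-held lists inside the loop.  Objective: simpler.

-- ===== PORT A =====
-- the loop body of A: read the five fields, append each to its trends list, append the row to table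
-- (game.get("GAME_ID", "N/A") is computed and never used in A; it has no effect and is not ported)
def pvStepA (st : PySem.Dict String (List Int) × List (List Int)) (game : List (String × Int)) :
    PySem.Dict String (List Int) × List (List Int) :=
  let g : PySem.Dict String Int := PySem.Dict.mk game
  let points := g.getD "PTS" 0
  let assists := g.getD "AST" 0
  let rebounds := g.getD "REB" 0
  let blocks := g.getD "BLK" 0
  let steals := g.getD "STL" 0
  let trends := st.1
  let trends := trends.modify "points" [] (fun l => l ++ [points])
  let trends := trends.modify "assists" [] (fun l => l ++ [assists])
  let trends := trends.modify "rebounds" [] (fun l => l ++ [rebounds])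
  let trends := trends.modify "blocks" [] (fun l => l ++ [blocks])
  let trends := trends.modify "steals" [] (fun l => l ++ [steals])
  (trends, st.2 ++ [[points, assists, rebounds, blocks, steals]])

def parse_statistics (stats : List (List (String × Int))) : (List (String × List Int)) × List (List Int) :=
  let init : PySem.Dict String (List Int) :=
    PySem.Dict.mk [("points", []), ("assists", []), ("rebounds", []), ("blocks", []), ("steals", [])]
  let res := stats.foldl pvStepA (init, [])
  (res.1.items, res.2)

-- ===== PORT B =====
def parse_statistics_alt (stats : List (List (String × Int))) : (List (String × List Int)) × List (List Int) :=
  let keys : List String := ["PTS", "AST", "REB", "BLK", "STL"]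
  let table : List (List Int) := stats.map (fun game => keys.map (fun k => (PySem.Dict.mk game).getD k 0))
  let names : List String := ["points", "assists", "rebounds", "blocks", "steals"]
  -- zip(*table): column i is the list of the i-th entries of the rows (all rows have length 5)
  let cols : List (List Int) :=
    if table = [] then names.map (fun _ => [])
    else (List.range keys.length).map (fun i => table.map (fun r => r.getD i 0))
  (names.zip cols, table)

-- ===== PRECONDITION & SPEC =====
def Spec_parse_statistics (stats : List (List (String × Int))) (out : (List (String × List Int)) × List (List Int)) : Prop := out = parse_statistics_alt stats
instance (stats : List (List (String × Int))) (out : (List (String × List Int)) × List (List Int)) : Decidable (Spec_parse_statistics stats out) := by unfold Spec_parse_statistics; infer_instance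

-- ===== CLAIM (what is proved, stated in full; the proofs are below) =====
def Claim_equal_parse_statistics : Prop := ∀ (stats : List (List (String × Int))), Dom_parse_statistics stats → Spec_parse_statistics stats (parse_statistics stats)

-- ===== LEMMAS AND PROOFS =====

-- the five field columns
def pvCol (k : String) (stats : List (List (String × Int))) : List Int :=
  stats.map (fun game => (PySem.Dict.mk game).getD k 0)

def pvRow (game : List (String × Int)) : List Int :=
  [(PySem.Dict.mk game).getD "PTS" 0, (PySem.Dict.mk game).getD "AST" 0,
   (PySem.Dict.mk game).getD "REB" 0, (PySem.Dict.mk game).getD "BLK" 0,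
   (PySem.Dict.mk game).getD "STL" 0]

lemma pvFoldA (stats : List (List (String × Int))) :
    ∀ (ps as rs bs ss : List Int) (t : List (List Int)),
    stats.foldl pvStepA
      (PySem.Dict.mk [("points", ps), ("assists", as), ("rebounds", rs), ("blocks", bs), ("steals", ss)], t)
      = (PySem.Dict.mk [("points", ps ++ pvCol "PTS" stats), ("assists", as ++ pvCol "AST" stats),
          ("rebounds", rs ++ pvCol "REB" stats), ("blocks", bs ++ pvCol "BLK" stats),
          ("steals", ss ++ pvCol "STL" stats)], t ++ stats.map pvRow) := by
  induction stats with
  | nil => intro ps as rs bs ss t; simp [pvCol]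
  | cons g gs ih =>
    intro ps as rs bs ss t
    have hstep : pvStepA
        (PySem.Dict.mk [("points", ps), ("assists", as), ("rebounds", rs), ("blocks", bs), ("steals", ss)], t) g
        = (PySem.Dict.mk [("points", ps ++ [(PySem.Dict.mk g).getD "PTS" 0]),
            ("assists", as ++ [(PySem.Dict.mk g).getD "AST" 0]),
            ("rebounds", rs ++ [(PySem.Dict.mk g).getD "REB" 0]),
            ("blocks", bs ++ [(PySem.Dict.mk g).getD "BLK" 0]),
            ("steals", ss ++ [(PySem.Dict.mk g).getD "STL" 0])], t ++ [pvRow g]) := by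
      simp [pvStepA, pvRow, PySem.Dict.modify, PySem.Dict.insert, PySem.Dict.getD, PySem.Dict.get?, PySem.Dict.contains]
    rw [List.foldl_cons, hstep, ih]
    simp [pvCol]

lemma pvA_eq (stats : List (List (String × Int))) :
    parse_statistics stats
      = ([("points", pvCol "PTS" stats), ("assists", pvCol "AST" stats),
          ("rebounds", pvCol "REB" stats), ("blocks", pvCol "BLK" stats),
          ("steals", pvCol "STL" stats)], stats.map pvRow) := by
  simp [parse_statistics, pvFoldA stats [] [] [] [] [] []]

lemma pvB_eq (stats : List (List (String × Int))) :
    parse_statistics_alt stats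
      = ([("points", pvCol "PTS" stats), ("assists", pvCol "AST" stats),
          ("rebounds", pvCol "REB" stats), ("blocks", pvCol "BLK" stats),
          ("steals", pvCol "STL" stats)], stats.map pvRow) := by
  unfold parse_statistics_alt
  cases stats with
  | nil => simp [pvCol]
  | cons g gs =>
    simp only [List.map_cons, List.length_cons]
    rw [if_neg (by simp)]
    simp [List.range_succ, pvCol, pvRow, List.zip]

-- ===== VERDICT (by name: the statement is the Claim_ definition above) =====
theorem parse_statistics_spec : Claim_equal_parse_statistics := by
  intro stats _
  unfold Spec_parse_statistics
  rw [pvA_eq, pvB_eq]
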